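-- pv_equiv track=rewrite | github.com/languageislands/heathdogon | lexibank_heathdogon.py | ungroup
-- ===== SOURCE A (Python) =====
-- def ungroup(sounds):
--     out = []
--     for segment in sounds:
--         if "." in segment:
--             out += segment.split(".")
--         else:
--             out += [segment]
--     return out
-- ===== SOURCE B (Python) =====
-- def ungroup(sounds):
--     return ".".join(sounds).split(".") if sounds else []
-- ===== Notes on version B (the rewrite author's own statement) =====
-- stated objective: simpler
-- what changed: Replaces the per-segment loop and dot-membership branch by a single join-then-split pipeline: joining with '.' and splitting on '.' makes segment boundaries and internal dots the same split points; a guard on empty input preserves the empty result.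
import Mathlib
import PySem

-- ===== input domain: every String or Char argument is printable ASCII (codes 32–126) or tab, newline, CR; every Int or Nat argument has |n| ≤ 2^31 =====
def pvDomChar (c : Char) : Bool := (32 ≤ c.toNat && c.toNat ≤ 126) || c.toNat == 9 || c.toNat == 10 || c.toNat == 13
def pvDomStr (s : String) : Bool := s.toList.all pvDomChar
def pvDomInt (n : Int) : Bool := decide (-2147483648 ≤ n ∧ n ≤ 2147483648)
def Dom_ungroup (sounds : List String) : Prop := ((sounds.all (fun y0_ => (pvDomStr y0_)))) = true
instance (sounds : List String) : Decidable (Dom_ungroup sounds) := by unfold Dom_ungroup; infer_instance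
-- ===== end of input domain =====

-- B replaces the per-segment loop/branch with a single join-on-'.' then split-on-'.' pipeline (with an empty-input guard); same result, simpler.

-- ===== PORT A =====
def ungroup (sounds : List String) : List String :=
  sounds.foldl
    (fun out segment =>
      if PySem.Str.isIn "." segment then
        out ++ (PySem.Str.split? segment ".").getD []
      else
        out ++ [segment])
    []

-- ===== PORT B =====
def ungroup_alt (sounds : List String) : List String :=
  if sounds = [] then []
  else (PySem.Str.split? (PySem.Str.join "." sounds) ".").getD []

-- ===== PRECONDITION & SPEC =====
def Spec_ungroup (sounds : List String) (out : List String) : Prop := out = ungroup_alt sounds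
instance (sounds : List String) (out : List String) : Decidable (Spec_ungroup sounds out) := by unfold Spec_ungroup; infer_instance

-- ===== CLAIM (what is proved, stated in full; the proofs are below) =====
def Claim_equal_ungroup : Prop := ∀ (sounds : List String), Dom_ungroup sounds → Spec_ungroup sounds (ungroup sounds)

-- ===== LEMMAS AND PROOFS =====

-- A simple structural splitter on '.' used only to characterise PySem.Chars.splitOn with separator ['.'].
def sd : List Char → List (List Char)
  | [] => [[]]
  | c :: rest =>
    if c = '.' then [] :: sd rest
    else
      match sd rest with
      | [] => [[c]]
      | q :: qs => (c :: q) :: qs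

theorem sd_ne_nil (l : List Char) : sd l ≠ [] := by
  cases l with
  | nil => simp [sd]
  | cons c rest =>
    simp only [sd]
    split_ifs
    · simp
    · cases h : sd rest <;> simp

-- prepend to the first piece
def consHead (p : List Char) : List (List Char) → List (List Char)
  | [] => [p]
  | q :: qs => (p ++ q) :: qs

theorem splitOn_go_spec : ∀ (fuel : Nat) (l cur : List Char) (acc : List (List Char)),
    l.length < fuel →
    PySem.Chars.splitOn.go ['.'] fuel l cur acc = acc.reverse ++ consHead cur.reverse (sd l) := by
  intro fuel
  induction fuel with
  | zero => intro l cur acc h; omega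
  | succ fuel ih =>
    intro l cur acc h
    cases l with
    | nil =>
      simp [PySem.Chars.splitOn.go, sd, consHead]
    | cons c rest =>
      by_cases hc : c = '.'
      · subst hc
        have hstep : PySem.Chars.splitOn.go ['.'] (fuel + 1) ('.' :: rest) cur acc
            = PySem.Chars.splitOn.go ['.'] fuel rest [] (cur.reverse :: acc) := by
          simp [PySem.Chars.splitOn.go, List.isPrefixOf]
        rw [hstep, ih rest [] (cur.reverse :: acc) (by simpa using Nat.lt_of_succ_lt_succ h)]
        cases hsd : sd rest with
        | nil => exact absurd hsd (sd_ne_nil rest)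
        | cons q qs => simp [sd, hsd, consHead]
      · have hstep : PySem.Chars.splitOn.go ['.'] (fuel + 1) (c :: rest) cur acc
            = PySem.Chars.splitOn.go ['.'] fuel rest (c :: cur) acc := by
          simp [PySem.Chars.splitOn.go, List.isPrefixOf]
          intro h'
          exact absurd h'.symm hc
        rw [hstep, ih rest (c :: cur) acc (by simpa using Nat.lt_of_succ_lt_succ h)]
        cases hsd : sd rest with
        | nil => exact absurd hsd (sd_ne_nil rest)
        | cons q qs => simp [sd, hsd, hc, consHead]

theorem splitOn_eq_sd (l : List Char) : PySem.Chars.splitOn l ['.'] = sd l := by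
  rw [PySem.Chars.splitOn,
    splitOn_go_spec (l.length + 1) l [] [] (by omega)]
  cases hsd : sd l with
  | nil => exact absurd hsd (sd_ne_nil l)
  | cons q qs => simp [consHead]

theorem sd_no_dot (l : List Char) (h : '.' ∉ l) : sd l = [l] := by
  induction l with
  | nil => simp [sd]
  | cons c rest ih =>
    have hc : c ≠ '.' := fun hc => h (hc ▸ List.mem_cons_self)
    have := ih (fun hm => h (List.mem_cons_of_mem _ hm))
    simp [sd, hc, this]

theorem sd_append_dot (a b : List Char) : sd (a ++ '.' :: b) = sd a ++ sd b := by
  induction a with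
  | nil => simp [sd]
  | cons c a' ih =>
    by_cases hc : c = '.'
    · subst hc; simp [sd, ih]
    · cases ha : sd a' with
      | nil => exact absurd ha (sd_ne_nil a')
      | cons q qs =>
        simp only [List.cons_append, sd, if_neg hc, ih, ha]

theorem sd_join (p : List Char) (rest : List (List Char)) :
    sd (PySem.Chars.join ['.'] (p :: rest)) = sd p ++ rest.flatMap sd := by
  induction rest generalizing p with
  | nil => simp [PySem.Chars.join_singleton]
  | cons q qs ih =>
    rw [PySem.Chars.join_cons_cons,
      show p ++ ['.'] ++ PySem.Chars.join ['.'] (q :: qs)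
          = p ++ '.' :: PySem.Chars.join ['.'] (q :: qs) by simp,
      sd_append_dot, ih]
    simp

-- s.split(".") as a map over sd
theorem split_dot (s : String) :
    (PySem.Str.split? s ".").getD [] = (sd s.toList).map String.ofList := by
  have h1 : PySem.Chars.split? s.toList ['.']
      = some (PySem.Chars.splitOn s.toList ['.']) := by
    simp [PySem.Chars.split?]
  simp [PySem.Str.split?, h1, splitOn_eq_sd]

-- the per-segment contribution in A equals split-on-dot in both branches
theorem segment_pieces (segment : String) :
    (if PySem.Str.isIn "." segment then (PySem.Str.split? segment ".").getD [] else [segment])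
      = (sd segment.toList).map String.ofList := by
  by_cases hd : PySem.Str.isIn "." segment
  · rw [if_pos hd, split_dot]
  · rw [if_neg hd]
    have hmem : '.' ∉ segment.toList := by
      intro hm
      obtain ⟨u, t, hst⟩ := List.append_of_mem hm
      exact hd ((PySem.Str.isIn_iff_infix "." segment).mpr ⟨u, t, by simp [hst]⟩)
    simp [sd_no_dot _ hmem]

theorem ungroup_flatMap (sounds : List String) :
    ungroup sounds = sounds.flatMap (fun s => (sd s.toList).map String.ofList) := by
  unfold ungroup
  rw [show (fun (out : List String) segment =>
        if PySem.Str.isIn "." segment then out ++ (PySem.Str.split? segment ".").getD []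
        else out ++ [segment])
      = (fun out s => out ++ (sd s.toList).map String.ofList) from
    funext fun out => funext fun s => by
      rw [← segment_pieces s]; split_ifs <;> rfl]
  rw [PySem.List.foldl_append_eq_flatMap]
  simp

-- ===== VERDICT (by name: the statement is the Claim_ definition above) =====
theorem ungroup_spec : Claim_equal_ungroup := by
  intro sounds _
  unfold Spec_ungroup ungroup_alt
  cases sounds with
  | nil => simp [ungroup]
  | cons p rest =>
    rw [if_neg (by simp), split_dot, ungroup_flatMap]
    have hjoin : (PySem.Str.join "." (p :: rest)).toList
        = PySem.Chars.join ['.'] (p.toList :: rest.map String.toList) := by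
      simp [PySem.Str.join, String.toList_ofList]
    rw [hjoin, sd_join]
    simp [List.flatMap_map, List.map_flatMap]
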